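-- pv_equiv track=rewrite | github.com/paladin952/AlgorithmsProblems | Codeforces/A. cAPS LOCK.py | is_caps_lock_word
-- ===== SOURCE A (Python) =====
-- def is_caps_lock_word(word):
--
--     if len(word) == 1:
--         return True
--
--     if word[0].islower() and word[1].islower():
--         return False
--
--     if word[0].islower() and word[1].isupper():
--         for i in range(2, len(word)):
--             if word[i].islower():
--                 return False
--         return True
--
--     for letter in word:
--         if letter.islower():
--             return False
--     return True
-- ===== SOURCE B (Python) =====
-- def is_caps_lock_word(word):
--     lowers = [i for i, c in enumerate(word) if c.islower()]
--     return not lowers or (lowers == [0] and (len(word) == 1 or word[1].isupper()))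
-- ===== Notes on version B (the rewrite author's own statement) =====
-- stated objective: simpler
-- what changed: Replaces A's length/first-two-chars case split with its early-return loops by one enumerate pass collecting the indices of lowercase characters, then a single closed-form test on that index list.
import Mathlib
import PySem

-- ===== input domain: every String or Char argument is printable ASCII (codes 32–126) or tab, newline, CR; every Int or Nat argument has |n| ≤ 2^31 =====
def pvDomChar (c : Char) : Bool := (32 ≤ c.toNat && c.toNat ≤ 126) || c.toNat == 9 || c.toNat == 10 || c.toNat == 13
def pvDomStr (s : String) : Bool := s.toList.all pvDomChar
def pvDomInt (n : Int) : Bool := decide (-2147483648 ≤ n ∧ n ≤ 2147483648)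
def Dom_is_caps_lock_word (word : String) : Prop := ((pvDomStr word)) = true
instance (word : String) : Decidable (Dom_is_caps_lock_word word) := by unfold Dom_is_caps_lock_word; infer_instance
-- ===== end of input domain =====

-- B replaces A's branch-and-loop case split by one pass collecting lowercase indices
-- plus a closed-form test on that list (objective: simpler). Equal return value on
-- every non-empty word; A raises IndexError on "" (excluded by Pre_).

-- ===== PORT A =====
-- literal transliteration of A over the code-point list
def capsA (cs : List Char) : Bool :=
  if cs.length = 1 then true
  else
    match cs with
    | c0 :: c1 :: rest =>
      if PySem.Chars.islower c0 && PySem.Chars.islower c1 then false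
      else if PySem.Chars.islower c0 && PySem.Chars.isupper c1 then
        -- for i in range(2, len(word)): early-return False on a lowercase char, else True
        rest.all (fun c => !(PySem.Chars.islower c))
      else
        -- for letter in word: early-return False on a lowercase char, else True
        cs.all (fun c => !(PySem.Chars.islower c))
    | _ => true  -- cs = []: Python raises IndexError here (outside Pre_)

def is_caps_lock_word (word : String) : Bool := capsA word.toList

-- ===== PORT B =====
-- lowers = [i for i, c in enumerate(word) if c.islower()]
def lowersOf (cs : List Char) : List Int :=
  ((PySem.List.enumerate cs).filter (fun p => PySem.Chars.islower p.2)).map (·.1)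

def capsB (cs : List Char) : Bool :=
  let lowers := lowersOf cs
  lowers.isEmpty ||
    (lowers == [(0 : Int)] &&
      (cs.length == 1 ||
        (match PySem.List.pyGet? cs 1 with
         | some c => PySem.Chars.isupper c
         | none => false)))

def is_caps_lock_word_alt (word : String) : Bool := capsB word.toList

-- ===== PRECONDITION & SPEC =====
-- Pre_ excludes only the empty string, on which A raises IndexError at word[0].
def Pre_is_caps_lock_word (word : String) : Prop := word ≠ ""
instance (word : String) : Decidable (Pre_is_caps_lock_word word) := by unfold Pre_is_caps_lock_word; infer_instance
def pvWitness_is_caps_lock_word : String := "HTtp"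

def Spec_is_caps_lock_word (word : String) (out : Bool) : Prop := out = is_caps_lock_word_alt word
instance (word : String) (out : Bool) : Decidable (Spec_is_caps_lock_word word out) := by unfold Spec_is_caps_lock_word; infer_instance

-- ===== CLAIM (what is proved, stated in full; the proofs are below) =====
def Claim_equal_is_caps_lock_word : Prop := ∀ (word : String), Dom_is_caps_lock_word word → Pre_is_caps_lock_word word → Spec_is_caps_lock_word word (is_caps_lock_word word)

-- ===== LEMMAS AND PROOFS =====

theorem lowersOf_cons (n : Int) (c : Char) (tl : List Char) :
    ((PySem.List.enumerate (c :: tl) n).filter (fun p => PySem.Chars.islower p.2)).map (·.1)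
      = (if PySem.Chars.islower c then [n] else [])
        ++ ((PySem.List.enumerate tl (n+1)).filter (fun p => PySem.Chars.islower p.2)).map (·.1) := by
  by_cases h : PySem.Chars.islower c = true <;>
    simp [PySem.List.enumerate_cons, h]

theorem lowersOf_nil_iff (cs : List Char) (n : Int) :
    (((PySem.List.enumerate cs n).filter (fun p => PySem.Chars.islower p.2)).map (·.1) = []
      ↔ cs.all (fun c => !(PySem.Chars.islower c)) = true) := by
  induction cs generalizing n with
  | nil => simp [PySem.List.enumerate_nil]
  | cons c tl ih =>
    rw [lowersOf_cons]
    by_cases h : PySem.Chars.islower c = true <;> simp [h, ih (n+1)]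

theorem lowersOf_mem_ge (cs : List Char) (n m : Int)
    (hm : m ∈ ((PySem.List.enumerate cs n).filter (fun p => PySem.Chars.islower p.2)).map (·.1)) :
    n ≤ m := by
  simp only [List.mem_map, List.mem_filter] at hm
  obtain ⟨p, ⟨hp, _⟩, rfl⟩ := hm
  rw [PySem.List.mem_enumerate_iff] at hp
  obtain ⟨k, hk, rfl⟩ := hp
  simp

theorem is_caps_lock_word_spec : Claim_equal_is_caps_lock_word := by
  intro word _ hpre
  unfold Spec_is_caps_lock_word is_caps_lock_word is_caps_lock_word_alt
  have hcs : word.toList ≠ [] := by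
    intro h
    exact hpre (by simpa using h)
  generalize word.toList = cs at hcs
  match cs, hcs with
  | [c0], _ =>
    simp only [capsA, capsB, lowersOf]
    by_cases h : PySem.Chars.islower c0 = true <;>
      simp [PySem.List.enumerate_cons, PySem.List.enumerate_nil, h]
  | c0 :: c1 :: rest, _ =>
    have hlow : lowersOf (c0 :: c1 :: rest)
        = (if PySem.Chars.islower c0 then [(0:Int)] else [])
          ++ ((if PySem.Chars.islower c1 then [(1:Int)] else [])
          ++ ((PySem.List.enumerate rest ((0:Int)+1+1)).filter
                (fun p => PySem.Chars.islower p.2)).map (·.1)) := by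
      unfold lowersOf
      rw [lowersOf_cons, lowersOf_cons]
      norm_num
    set L := ((PySem.List.enumerate rest ((0:Int)+1+1)).filter
        (fun p => PySem.Chars.islower p.2)).map (·.1) with hLdef
    have hLnil : L = [] ↔ rest.all (fun c => !(PySem.Chars.islower c)) = true :=
      lowersOf_nil_iff rest _
    have hL0 : L ≠ [(0:Int)] := by
      intro h
      have h0mem : (0:Int) ∈ L := by rw [h]; exact List.mem_singleton_self _
      rw [hLdef] at h0mem
      have := lowersOf_mem_ge rest ((0:Int)+1+1) 0 h0mem
      omega
    have hget : PySem.List.pyGet? (c0 :: c1 :: rest) 1 = some c1 := by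
      simp [PySem.List.pyGet?, PySem.List.pyIdx?]
    by_cases h0 : PySem.Chars.islower c0 = true
    · by_cases h1 : PySem.Chars.islower c1 = true
      · simp [capsA, capsB, hlow, h0, h1]
      · by_cases hu : PySem.Chars.isupper c1 = true
        · by_cases hr : rest.all (fun c => !(PySem.Chars.islower c)) = true <;>
            simp [capsA, capsB, hlow, h0, h1, hu, hLnil, hr]
        · simp [capsA, capsB, hlow, h0, h1, hu]
    · by_cases h1 : PySem.Chars.islower c1 = true
      · simp [capsA, capsB, hlow, h0, h1]
      · by_cases hr : rest.all (fun c => !(PySem.Chars.islower c)) = true <;>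
          simp [capsA, capsB, hlow, h0, h1, hLnil, hr, hL0]
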